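-- pv_equiv track=rewrite | github.com/awstn/cs50 | pset6-credit-dna/dna/dna.py | createSTRDict
-- ===== SOURCE A (Python) =====
-- def createSTRDict(database: list, sequence: str):
--     strMatches = {}
--     for dictionary in database:
--         for str, count in dictionary.items():
--             if str == "name":
--                 continue
--
--             strMatches[str] = longest_match(sequence, str)
--
--     return strMatches
--
-- def longest_match(sequence, subsequence):
--     """Returns length of longest run of subsequence in sequence."""
--
--     # Initialize variables
--     longest_run = 0
--     subsequence_length = len(subsequence)
--     sequence_length = len(sequence)
--
--     # Check each character in sequence for most consecutive runs of subsequence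
--     for i in range(sequence_length):
--
--         # Initialize count of consecutive runs
--         count = 0
--
--         # Check for a subsequence match in a "substring" (a subset of characters) within sequence
--         # If a match, move substring to next potential match in sequence
--         # Continue moving substring and checking for matches until out of consecutive matches
--         while True:
--
--             # Adjust substring start and end
--             start = i + count * subsequence_length
--             end = start + subsequence_length
--
--             # If there is a match in the substring
--             if sequence[start:end] == subsequence:
--                 count += 1
--
--             # If there is no match in the substring
--             else:
--                 break
--
--         # Update most consecutive matches found
--         longest_run = max(longest_run, count)
--
--     # After checking for runs at each character in seqeuence, return longest run found
--     return longest_run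
-- ===== SOURCE B (Python) =====
-- def createSTRDict(database: list, sequence: str):
--     strMatches = {}
--     for dictionary in database:
--         for key, count in dictionary.items():
--             if key == "name":
--                 continue
--             strMatches[key] = longest_run(sequence, key)
--     return strMatches
--
-- def longest_run(sequence, subsequence):
--     """Longest tandem-repeat run count, by a single backward DP pass."""
--     k = len(subsequence)
--     n = len(sequence)
--     if k == 0:
--         return 0
--     best = 0
--     dp = [0] * (n + k)  # dp[i] = runs starting at i; tail padding stays 0
--     i = n - k
--     while i >= 0:
--         if sequence[i:i + k] == subsequence:
--             v = dp[i + k] + 1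
--             dp[i] = v
--             if v > best:
--                 best = v
--         i -= 1
--     return best
-- ===== Notes on version B (the rewrite author's own statement) =====
-- stated objective: faster
-- what changed: Replaces A's per-start rescan (for each of the n positions an inner while re-matches the whole run) by a single backward dynamic-programming pass dp[i] = dp[i+k] + 1 on a match, tracking the running maximum.
import Mathlib
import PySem

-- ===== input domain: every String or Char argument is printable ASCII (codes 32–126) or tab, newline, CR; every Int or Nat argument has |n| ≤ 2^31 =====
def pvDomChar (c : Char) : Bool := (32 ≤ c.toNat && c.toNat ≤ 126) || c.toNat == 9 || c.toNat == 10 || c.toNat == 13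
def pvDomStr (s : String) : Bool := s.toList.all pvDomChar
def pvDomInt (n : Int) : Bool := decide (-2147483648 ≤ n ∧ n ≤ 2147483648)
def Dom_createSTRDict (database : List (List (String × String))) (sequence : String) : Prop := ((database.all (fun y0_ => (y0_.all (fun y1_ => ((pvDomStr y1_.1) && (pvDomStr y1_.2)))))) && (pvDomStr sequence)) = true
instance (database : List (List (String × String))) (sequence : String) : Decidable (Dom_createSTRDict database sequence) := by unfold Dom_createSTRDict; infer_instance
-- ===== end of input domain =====

-- B replaces A's per-position rescan (inner `while` re-matching runs at every start) by one backward
-- DP pass dp[i] = dp[i+k] + 1 on a match; equivalence of the returned dict is proved on Pre_ below.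

-- ===== PORT A =====
-- The unbounded `while True` of longest_match, as fuelled recursion on `count`'s loop; fuel
-- sequence_length + 1 is enough on Pre_ (subsequence nonempty, or sequence empty): each successful
-- match consumes k ≥ 1 fresh characters of the sequence.
-- sequence[start:end] with natural start, end = start + k is exactly (drop start).take k
-- (PySem.List.slice_natCast_add).
def pyWhileCount (seq sub : List Char) (i k : Nat) : Nat → Nat → Nat
  | 0, count => count
  | fuel + 1, count =>
      -- start = i + count * subsequence_length; end = start + subsequence_length
      if (seq.drop (i + count * k)).take k = sub then
        pyWhileCount seq sub i k fuel (count + 1)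
      else count

def pyLongestMatch (sequence subsequence : List Char) : Int :=
  let subsequence_length := subsequence.length
  let sequence_length := sequence.length
  (List.range sequence_length).foldl
    (fun longest_run i =>
      max longest_run
        ((pyWhileCount sequence subsequence i subsequence_length (sequence_length + 1) 0 : Nat) : Int))
    0

def createSTRDict (database : List (List (String × String))) (sequence : String) : List (String × Int) :=
  (database.foldl
    (fun strMatches dictionary =>
      dictionary.foldl
        (fun strMatches p =>
          if p.1 = "name" then strMatches
          else strMatches.insert p.1 (pyLongestMatch sequence.toList p.1.toList))
        strMatches)
    (PySem.Dict.empty : PySem.Dict String Int)).items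

-- ===== PORT B =====
-- the `while i >= 0` loop counting i down from n - k; fuel = number of iterations = max (n-k+1, 0),
-- current i = fuel - 1.  dp[i+k] is always in range (i + k ≤ n < n + k), so List.getD is exact,
-- and dp[i] = v is List.set (index in range).
def bLoop (seq sub : List Char) (k : Nat) : Nat → List Int → Int → Int
  | 0, _, best => best
  | i + 1, dp, best =>
      if (seq.drop i).take k = sub then
        let v := dp.getD (i + k) 0 + 1
        bLoop seq sub k i (dp.set i v) (if v > best then v else best)
      else
        bLoop seq sub k i dp best

def bLongestRun (sequence subsequence : List Char) : Int :=
  let k := subsequence.length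
  let n := sequence.length
  if k = 0 then 0
  else
    bLoop sequence subsequence k ((n : Int) - k + 1).toNat (List.replicate (n + k) 0) 0

def createSTRDict_alt (database : List (List (String × String))) (sequence : String) : List (String × Int) :=
  (database.foldl
    (fun strMatches dictionary =>
      dictionary.foldl
        (fun strMatches p =>
          if p.1 = "name" then strMatches
          else strMatches.insert p.1 (bLongestRun sequence.toList p.1.toList))
        strMatches)
    (PySem.Dict.empty : PySem.Dict String Int)).items

-- ===== PRECONDITION & SPEC =====
-- Pre_ excludes exactly the inputs on which A never returns: with a nonempty sequence, an empty
-- STR key (≠ "name") makes longest_match's `while True` loop forever (the empty slice always matches).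
def Pre_createSTRDict (database : List (List (String × String))) (sequence : String) : Prop :=
  sequence.toList = [] ∨ ∀ d ∈ database, ∀ p ∈ d, p.1 = "name" ∨ p.1.toList ≠ []
instance (database : List (List (String × String))) (sequence : String) : Decidable (Pre_createSTRDict database sequence) := by unfold Pre_createSTRDict; infer_instance

def pvWitness_createSTRDict : (List (List (String × String))) × String :=
  ([[("name", "Alice"), ("AGT", "2")], [("AG", "4")]], "AGTAGTAG")

def Spec_createSTRDict (database : List (List (String × String))) (sequence : String) (out : List (String × Int)) : Prop := out = createSTRDict_alt database sequence
instance (database : List (List (String × String))) (sequence : String) (out : List (String × Int)) : Decidable (Spec_createSTRDict database sequence out) := by unfold Spec_createSTRDict; infer_instance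

-- ===== CLAIM (what is proved, stated in full; the proofs are below) =====
def Claim_equal_createSTRDict : Prop := ∀ (database : List (List (String × String))) (sequence : String), Dom_createSTRDict database sequence → Pre_createSTRDict database sequence → Spec_createSTRDict database sequence (createSTRDict database sequence)

-- ===== LEMMAS AND PROOFS =====

-- Reference function: pvF fuel i = length of the run of `sub` starting at position i (fuelled).
def pvF (seq sub : List Char) (k : Nat) : Nat → Nat → Nat
  | 0, _ => 0
  | fuel + 1, i => if (seq.drop i).take k = sub then pvF seq sub k fuel (i + k) + 1 else 0

-- a match at i needs k whole characters: i + k ≤ n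
lemma pv_match_bound {seq sub : List Char} {k i : Nat} (hk : 1 ≤ k) (hsub : sub.length = k)
    (h : (seq.drop i).take k = sub) : i + k ≤ seq.length := by
  have := congrArg List.length h
  simp [List.length_take, List.length_drop] at this
  omega

lemma pv_no_match {seq sub : List Char} {k i : Nat} (hk : 1 ≤ k) (hsub : sub.length = k)
    (h : seq.length < i + k) : ¬ (seq.drop i).take k = sub := by
  intro hm
  have := pv_match_bound hk hsub hm
  omega

-- pvF is independent of the fuel once the fuel exceeds n - i
lemma pvF_stab {seq sub : List Char} {k : Nat} (hk : 1 ≤ k) (hsub : sub.length = k) :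
    ∀ f₁ f₂ i, seq.length < i + f₁ → seq.length < i + f₂ →
      pvF seq sub k f₁ i = pvF seq sub k f₂ i := by
  intro f₁
  induction f₁ with
  | zero =>
    intro f₂ i h1 h2
    cases f₂ with
    | zero => rfl
    | succ g =>
      simp only [pvF]
      rw [if_neg (pv_no_match hk hsub (by omega))]
  | succ f ih =>
    intro f₂ i h1 h2
    cases f₂ with
    | zero =>
      simp only [pvF]
      rw [if_neg (pv_no_match hk hsub (by omega))]
    | succ g =>
      simp only [pvF]
      by_cases hm : (seq.drop i).take k = sub
      · rw [if_pos hm, if_pos hm]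
        have hb := pv_match_bound hk hsub hm
        rw [ih g (i + k) (by omega) (by omega)]
      · rw [if_neg hm, if_neg hm]

-- canonical fuel n+1: one-step unfolding
lemma pvF_rec {seq sub : List Char} {k : Nat} (hk : 1 ≤ k) (hsub : sub.length = k) (i : Nat) :
    pvF seq sub k (seq.length + 1) i =
      if (seq.drop i).take k = sub then pvF seq sub k (seq.length + 1) (i + k) + 1 else 0 := by
  conv_lhs => rw [pvF]
  by_cases hm : (seq.drop i).take k = sub
  · rw [if_pos hm, if_pos hm,
      pvF_stab hk hsub seq.length (seq.length + 1) (i + k) (by omega) (by omega)]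
  · rw [if_neg hm, if_neg hm]

lemma pvF_eq_zero {seq sub : List Char} {k : Nat} (hk : 1 ≤ k) (hsub : sub.length = k)
    (fuel i : Nat) (h : seq.length < i + k) : pvF seq sub k fuel i = 0 := by
  cases fuel with
  | zero => rfl
  | succ f =>
    simp only [pvF]
    rw [if_neg (pv_no_match hk hsub h)]

-- A's inner while loop computes pvF
lemma pyWhileCount_eq_pvF (seq sub : List Char) (i k : Nat) :
    ∀ fuel count, pyWhileCount seq sub i k fuel count = count + pvF seq sub k fuel (i + count * k) := by
  intro fuel
  induction fuel with
  | zero => intro count; simp [pyWhileCount, pvF]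
  | succ f ih =>
    intro count
    simp only [pyWhileCount, pvF]
    by_cases hm : (seq.drop (i + count * k)).take k = sub
    · rw [if_pos hm, if_pos hm, ih (count + 1)]
      have : i + (count + 1) * k = i + count * k + k := by ring
      rw [this]
      omega
    · rw [if_neg hm, if_neg hm]
      omega

-- running maximum of pvF over positions 0 .. m-1
def pvMx (seq sub : List Char) (k : Nat) : Nat → Int
  | 0 => 0
  | m + 1 => max (pvMx seq sub k m) ((pvF seq sub k (seq.length + 1) m : Nat) : Int)

lemma pvMx_nonneg (seq sub : List Char) (k : Nat) : ∀ m, 0 ≤ pvMx seq sub k m := by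
  intro m
  induction m with
  | zero => simp [pvMx]
  | succ m ih => simp only [pvMx]; omega

-- A's outer for loop, truncated at any bound m, computes pvMx m
lemma pv_foldl_range (seq sub : List Char) : ∀ m,
    (List.range m).foldl
      (fun longest_run i =>
        max longest_run
          ((pyWhileCount seq sub i sub.length (seq.length + 1) 0 : Nat) : Int)) 0
      = pvMx seq sub sub.length m := by
  intro m
  induction m with
  | zero => simp [pvMx]
  | succ m ih =>
    rw [List.range_succ, List.foldl_append, ih]
    simp only [List.foldl_cons, List.foldl_nil, pvMx,
      pyWhileCount_eq_pvF seq sub m sub.length (seq.length + 1) 0]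
    simp

-- A's outer for loop computes pvMx
lemma pyLongestMatch_eq_pvMx (seq sub : List Char) :
    pyLongestMatch seq sub = pvMx seq sub sub.length seq.length := by
  unfold pyLongestMatch
  exact pv_foldl_range seq sub seq.length

lemma pvMx_tail (seq sub : List Char) {k : Nat} (hk : 1 ≤ k) (hsub : sub.length = k) :
    ∀ m, ((seq.length : Int) - k + 1).toNat ≤ m →
      pvMx seq sub k m = pvMx seq sub k (((seq.length : Int) - k + 1).toNat) := by
  intro m
  induction m with
  | zero =>
    intro h
    have h0 : ((seq.length : Int) - k + 1).toNat = 0 := by omega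
    rw [h0]
  | succ m ih =>
    intro h
    rcases Nat.lt_or_ge (((seq.length : Int) - k + 1).toNat) (m + 1) with hlt | hge
    · have hm : ((seq.length : Int) - k + 1).toNat ≤ m := by omega
      rw [pvMx, ih hm, pvF_eq_zero hk hsub _ m (by omega)]
      have := pvMx_nonneg seq sub k (((seq.length : Int) - k + 1).toNat)
      simpa using this
    · have h0 : ((seq.length : Int) - k + 1).toNat = m + 1 := by omega
      rw [h0]

-- B's loop invariant: dp holds pvF on the already-processed suffix (and 0 below), bLoop folds the maximum
lemma bLoop_eq_max_pvMx (seq sub : List Char) {k : Nat} (hk : 1 ≤ k) (hsub : sub.length = k) :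
    ∀ fuel dp best, (fuel = 0 ∨ fuel + k ≤ seq.length + 1) → dp.length = seq.length + k →
      (∀ j, j < seq.length + k →
        dp.getD j 0 = if fuel ≤ j then ((pvF seq sub k (seq.length + 1) j : Nat) : Int) else 0) →
      0 ≤ best →
      bLoop seq sub k fuel dp best = max best (pvMx seq sub k fuel) := by
  intro fuel
  induction fuel with
  | zero =>
    intro dp best _ _ _ hb
    simp [bLoop, pvMx]
    omega
  | succ i ih =>
    intro dp best hfk hlen hdp hb
    have hik : i + k ≤ seq.length := by omega
    simp only [bLoop]
    by_cases hm : (seq.drop i).take k = sub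
    · rw [if_pos hm]
      have hvk : dp.getD (i + k) 0 = ((pvF seq sub k (seq.length + 1) (i + k) : Nat) : Int) := by
        rw [hdp (i + k) (by omega), if_pos (by omega)]
      have hvi : dp.getD (i + k) 0 + 1 = ((pvF seq sub k (seq.length + 1) i : Nat) : Int) := by
        rw [hvk, pvF_rec hk hsub i, if_pos hm]
        push_cast
        ring
      have hilen : i < dp.length := by omega
      rw [ih (dp.set i (dp.getD (i + k) 0 + 1)) _ (by omega) (by simpa using hlen)]
      · rw [pvMx, hvi]
        have h0 : (0 : Int) ≤ ((pvF seq sub k (seq.length + 1) i : Nat) : Int) := by positivity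
        by_cases hc : ((pvF seq sub k (seq.length + 1) i : Nat) : Int) > best <;> simp [hc] <;> omega
      · intro j hjlt
        by_cases hji : j = i
        · subst hji
          rw [List.getD_eq_getElem?_getD, List.getElem?_set_self hilen]
          simp only [Option.getD_some, if_pos (le_refl j)]
          simpa using hvi
        · rw [List.getD_eq_getElem?_getD, List.getElem?_set_ne (Ne.symm hji),
            ← List.getD_eq_getElem?_getD, hdp j hjlt]
          by_cases hij2 : i ≤ j
          · rw [if_pos hij2, if_pos (by omega)]
          · rw [if_neg hij2, if_neg (by omega)]
      · have h0 : (0 : Int) ≤ dp.getD (i + k) 0 + 1 := by rw [hvk]; positivity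
        split <;> omega
    · rw [if_neg hm]
      have hzero : pvF seq sub k (seq.length + 1) i = 0 := by
        rw [pvF_rec hk hsub i, if_neg hm]
      rw [ih dp best (by omega) hlen ?_ hb]
      · rw [pvMx, hzero]
        have h0 := pvMx_nonneg seq sub k i
        simp only [Nat.cast_zero]
        rw [max_eq_left h0]
      · intro j hjlt
        rw [hdp j hjlt]
        by_cases hji : j = i
        · subst hji
          rw [if_neg (by omega), if_pos (le_refl j), hzero]
          simp
        · by_cases hij2 : i ≤ j
          · rw [if_pos (by omega), if_pos hij2]
          · rw [if_neg (by omega), if_neg hij2]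

-- per-key equality of the two longest-run computations
lemma longest_eq (seq sub : List Char) (h : sub = [] → seq = []) :
    pyLongestMatch seq sub = bLongestRun seq sub := by
  by_cases hk : sub.length = 0
  · have hsub : sub = [] := List.eq_nil_of_length_eq_zero hk
    have hseq : seq = [] := h hsub
    subst hsub; subst hseq
    rfl
  · have hk1 : 1 ≤ sub.length := by omega
    unfold bLongestRun
    simp only [if_neg hk]
    rw [bLoop_eq_max_pvMx seq sub hk1 rfl (((seq.length : Int) - sub.length + 1).toNat)
      (List.replicate (seq.length + sub.length) 0) 0 (by omega) (by simp) ?_ le_rfl]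
    · rw [pyLongestMatch_eq_pvMx,
        pvMx_tail seq sub hk1 rfl seq.length (by omega)]
      have h0 := pvMx_nonneg seq sub sub.length (((seq.length : Int) - sub.length + 1).toNat)
      rw [max_eq_right h0]
    · intro j hjlt
      rw [List.getD_eq_getElem?_getD, List.getElem?_replicate, if_pos hjlt]
      by_cases hj : ((seq.length : Int) - sub.length + 1).toNat ≤ j
      · rw [if_pos hj, pvF_eq_zero hk1 rfl _ j (by omega)]
        simp
      · rw [if_neg hj]
        simp

theorem createSTRDict_spec : Claim_equal_createSTRDict := by
  intro database sequence _ hpre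
  unfold Spec_createSTRDict createSTRDict createSTRDict_alt
  congr 1
  apply PySem.List.foldl_congr_mem
  intro acc dict hdict
  apply PySem.List.foldl_congr_mem
  intro acc' p hp
  by_cases hname : p.1 = "name"
  · simp [hname]
  · rw [if_neg hname, if_neg hname]
    congr 1
    apply longest_eq
    intro hsub
    rcases hpre with hseq | hkeys
    · exact hseq
    · rcases hkeys dict hdict p hp with h1 | h2
      · exact absurd h1 hname
      · exact absurd hsub h2
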